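-- pv_equiv track=rewrite | github.com/simonavrillon/MUedit2 | python/src/muedit/services/editing_service.py | _parse_subject_session_from_entity_label
-- ===== SOURCE A (Python) =====
-- def _parse_subject_session_from_entity_label(entity_label: str) -> tuple[str, str | None]:
--     subject = "01"
--     session: str | None = None
--     for part in str(entity_label).split("_"):
--         if part.startswith("sub-") and len(part) > 4:
--             subject = part[4:]
--         elif part.startswith("ses-") and len(part) > 4:
--             session = part[4:]
--     return subject, session
-- ===== SOURCE B (Python) =====
-- def _parse_subject_session_from_entity_label(entity_label):
--     # One direct character scan over the string: recognise the subject/session tags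
--     # only at the start or right after a separator, take the following run of
--     # non-separator chars as the value (must be non-empty), last occurrence wins.
--     # No split, no token list.
--     s = str(entity_label)
--     subject = "01"
--     session = None
--     n = len(s)
--     i = 0
--     boundary = True  # at start of string or just after '_'
--     while i < n:
--         tag = s[i:i + 4]
--         if boundary and tag in ("sub-", "ses-") and i + 4 < n and s[i + 4] != "_":
--             j = i + 4
--             while j < n and s[j] != "_":
--                 j += 1
--             value = s[i + 4:j]
--             if tag == "sub-":
--                 subject = value
--             else:
--                 session = value
--             i = j
--             boundary = False
--         else:
--             boundary = s[i] == "_"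
--             i += 1
--     return subject, session
-- ===== Notes on version B (the rewrite author's own statement) =====
-- stated objective: alternative
-- what changed: Replaces split-on-underscore plus a token loop by a single hand-rolled character-level scanner over the raw string that recognises the subject/session tags only at token boundaries and captures the following non-separator run, last match winning; no token list is ever built.
import Mathlib
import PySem

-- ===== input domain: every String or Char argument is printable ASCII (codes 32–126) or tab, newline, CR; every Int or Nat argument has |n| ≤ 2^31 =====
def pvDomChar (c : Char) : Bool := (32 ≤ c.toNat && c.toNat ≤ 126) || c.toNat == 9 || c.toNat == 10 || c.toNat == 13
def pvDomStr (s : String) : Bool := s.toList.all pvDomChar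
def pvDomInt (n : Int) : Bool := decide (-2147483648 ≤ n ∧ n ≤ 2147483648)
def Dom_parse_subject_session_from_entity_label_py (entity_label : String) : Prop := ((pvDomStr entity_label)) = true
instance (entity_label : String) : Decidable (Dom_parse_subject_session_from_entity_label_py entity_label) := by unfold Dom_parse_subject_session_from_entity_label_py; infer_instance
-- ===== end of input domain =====

-- B replaces A's split-on-underscore plus token loop by a single character-level scanner over the raw string (alternative decomposition; same value everywhere).


-- ===== PORT A =====
-- A's two branch guards: part.startswith("sub-"/"ses-") and len(part) > 4; and part[4:]
def pvSubHit (p : String) : Bool := PySem.Str.startswith p "sub-" && decide ((4:Int) < PySem.Str.len p)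
def pvSesHit (p : String) : Bool := PySem.Str.startswith p "ses-" && decide ((4:Int) < PySem.Str.len p)
def pvTail4 (p : String) : String := PySem.Str.slice p (some 4) none
-- the body of A's for-loop, updating (subject, session)
def pvStep (st : String × Option String) (part : String) : String × Option String :=
  if pvSubHit part then (pvTail4 part, st.2)
  else if pvSesHit part then (st.1, some (pvTail4 part))
  else st

def parse_subject_session_from_entity_label_py (entity_label : String) : String × Option String :=
  ((PySem.Str.split? entity_label "_").getD []).foldl pvStep ("01", none)

-- ===== PORT B =====
-- Source B's inner while loop: the run of non-'_' chars (the captured value) and the rest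
def pvSpanVal : List Char → List Char × List Char
  | [] => ([], [])
  | c :: cs => if c = '_' then ([], c :: cs) else
      let p := pvSpanVal cs
      (c :: p.1, p.2)

theorem pvSpanVal_snd_length_le (l : List Char) : (pvSpanVal l).2.length ≤ l.length := by
  induction l with
  | nil => simp [pvSpanVal]
  | cons c cs ih =>
    simp only [pvSpanVal]
    split
    · simp
    · simpa using Nat.le_succ_of_le ih

-- Source B's match test at position i: tag = s[i:i+4] in ("sub-","ses-"), i+4 < n, s[i+4] != '_'
def pvTag (l : List Char) : Option Bool :=
  let tag := l.take 4
  let ok : Bool := match l.drop 4 with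
    | d :: _ => d != '_'
    | [] => false
  if tag = ['s', 'u', 'b', '-'] ∧ ok = true then some true
  else if tag = ['s', 'e', 's', '-'] ∧ ok = true then some false
  else none

-- Source B's outer while loop: one pass over the characters, boundary = start-of-string or just after '_'
def pvScan : List Char → Bool → String → Option String → String × Option String
  | [], _, subj, sess => (subj, sess)
  | c :: cs, boundary, subj, sess =>
    match (if boundary then pvTag (c :: cs) else none) with
    | some isSub =>
      let p := pvSpanVal (cs.drop 3)
      if isSub then pvScan p.2 false (String.ofList p.1) sess
      else pvScan p.2 false subj (some (String.ofList p.1))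
    | none => pvScan cs (c == '_') subj sess
termination_by l _ _ _ => l.length
decreasing_by
  · have h1 := pvSpanVal_snd_length_le (cs.drop 3)
    have h2 : (cs.drop 3).length ≤ cs.length := by simp
    simp only [List.length_cons]; omega
  · have h1 := pvSpanVal_snd_length_le (cs.drop 3)
    have h2 : (cs.drop 3).length ≤ cs.length := by simp
    simp only [List.length_cons]; omega
  · simp

def parse_subject_session_from_entity_label_py_alt (entity_label : String) : String × Option String :=
  pvScan entity_label.toList true "01" none

-- ===== PRECONDITION & SPEC =====
def Spec_parse_subject_session_from_entity_label_py (entity_label : String) (out : String × Option String) : Prop := out = parse_subject_session_from_entity_label_py_alt entity_label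
instance (entity_label : String) (out : String × Option String) : Decidable (Spec_parse_subject_session_from_entity_label_py entity_label out) := by unfold Spec_parse_subject_session_from_entity_label_py; infer_instance

-- ===== CLAIM (what is proved, stated in full; the proofs are below) =====
def Claim_equal_parse_subject_session_from_entity_label_py : Prop := ∀ (entity_label : String), Dom_parse_subject_session_from_entity_label_py entity_label → Spec_parse_subject_session_from_entity_label_py entity_label (parse_subject_session_from_entity_label_py entity_label)

-- ===== LEMMAS AND PROOFS =====

-- reference form of str.split('_') on the character list
def pvRefSplit : List Char → List (List Char)
  | [] => [[]]
  | c :: rest =>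
    if c = '_' then [] :: pvRefSplit rest
    else match pvRefSplit rest with
      | [] => [[c]]
      | p :: ps => (c :: p) :: ps

theorem pvRefSplit_ne_nil (l : List Char) : pvRefSplit l ≠ [] := by
  cases l with
  | nil => simp [pvRefSplit]
  | cons c rest =>
    simp only [pvRefSplit]
    split
    · simp
    · split <;> simp

def pvGlue (cur : List Char) (acc : List (List Char)) : List (List Char) → List (List Char)
  | [] => []
  | p :: ps => acc.reverse ++ (cur.reverse ++ p) :: ps

theorem pvGo_spec (l : List Char) (fuel : Nat) (cur : List Char) (acc : List (List Char))
    (h : l.length ≤ fuel) :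
    PySem.Chars.splitOn.go ['_'] fuel l cur acc = pvGlue cur acc (pvRefSplit l) := by
  induction l generalizing fuel cur acc with
  | nil =>
    cases fuel <;> simp [PySem.Chars.splitOn.go, pvRefSplit, pvGlue]
  | cons c rest ih =>
    cases fuel with
    | zero => simp at h
    | succ f =>
      simp only [PySem.Chars.splitOn.go]
      by_cases hc : c = '_'
      · subst hc
        have hpre : List.isPrefixOf ['_'] ('_' :: rest) = true := by simp [List.isPrefixOf]
        rw [if_pos hpre]
        simp only [List.length_singleton, List.drop_one, List.tail_cons]
        rw [ih f [] (cur.reverse :: acc) (by simpa using Nat.le_of_succ_le_succ h)]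
        obtain ⟨p, ps, hps⟩ : ∃ p ps, pvRefSplit rest = p :: ps := by
          rcases h' : pvRefSplit rest with _ | ⟨p, ps⟩
          · exact absurd h' (pvRefSplit_ne_nil rest)
          · exact ⟨p, ps, rfl⟩
        simp [pvRefSplit, hps, pvGlue]
      · have hpre : List.isPrefixOf ['_'] (c :: rest) = false := by
          simp [List.isPrefixOf, Ne.symm hc]
        rw [if_neg (by simp [hpre])]
        rw [ih f (c :: cur) acc (by simpa using Nat.le_of_succ_le_succ h)]
        obtain ⟨p, ps, hps⟩ : ∃ p ps, pvRefSplit rest = p :: ps := by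
          rcases h' : pvRefSplit rest with _ | ⟨p, ps⟩
          · exact absurd h' (pvRefSplit_ne_nil rest)
          · exact ⟨p, ps, rfl⟩
        simp [pvRefSplit, hc, hps, pvGlue]

theorem pvSplitOn_eq (l : List Char) : PySem.Chars.splitOn l ['_'] = pvRefSplit l := by
  rw [PySem.Chars.splitOn, pvGo_spec l (l.length + 1) [] [] (Nat.le_succ _)]
  obtain ⟨p, ps, hps⟩ : ∃ p ps, pvRefSplit l = p :: ps := by
    rcases h' : pvRefSplit l with _ | ⟨p, ps⟩
    · exact absurd h' (pvRefSplit_ne_nil l)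
    · exact ⟨p, ps, rfl⟩
  simp [hps, pvGlue]

theorem pvRefSplit_no_sep (p : List Char) (hp : '_' ∉ p) : pvRefSplit p = [p] := by
  induction p with
  | nil => simp [pvRefSplit]
  | cons c rest ih =>
    have hc : c ≠ '_' := fun h => hp (h ▸ List.mem_cons_self ..)
    have := ih (fun h => hp (List.mem_cons_of_mem _ h))
    simp [pvRefSplit, hc, this]

theorem pvRefSplit_append (p rest : List Char) (hp : '_' ∉ p) :
    pvRefSplit (p ++ '_' :: rest) = p :: pvRefSplit rest := by
  induction p with
  | nil => simp [pvRefSplit]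
  | cons c q ih =>
    have hc : c ≠ '_' := fun h => hp (h ▸ List.mem_cons_self ..)
    have h2 := ih (fun h => hp (List.mem_cons_of_mem _ h))
    obtain ⟨r, rs, hrs⟩ : ∃ r rs, pvRefSplit rest = r :: rs := by
      rcases h' : pvRefSplit rest with _ | ⟨r, rs⟩
      · exact absurd h' (pvRefSplit_ne_nil rest)
      · exact ⟨r, rs, rfl⟩
    simp [pvRefSplit, hc, h2, hrs]

theorem pvSpanVal_eq (v r : List Char) (hv : '_' ∉ v) (hr : r = [] ∨ ∃ t, r = '_' :: t) :
    pvSpanVal (v ++ r) = (v, r) := by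
  induction v with
  | nil =>
    rcases hr with rfl | ⟨t, rfl⟩ <;> simp [pvSpanVal]
  | cons c q ih =>
    have hc : c ≠ '_' := fun h => hv (h ▸ List.mem_cons_self ..)
    have := ih (fun h => hv (List.mem_cons_of_mem _ h))
    simp [pvSpanVal, hc, this]

theorem pvScan_false (p r : List Char) (hp : '_' ∉ p) (subj : String) (sess : Option String) :
    pvScan (p ++ r) false subj sess = pvScan r false subj sess := by
  induction p with
  | nil => rfl
  | cons c q ih =>
    have hc : c ≠ '_' := fun h => hp (h ▸ List.mem_cons_self ..)
    rw [List.cons_append, pvScan]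
    simp only [if_false, Bool.false_eq_true]
    rw [show (c == '_') = false from by simp [hc]]
    exact ih (fun h => hp (List.mem_cons_of_mem _ h))

theorem pvHit_iff (p r : List Char) (hp : '_' ∉ p) (hr : r = [] ∨ ∃ t, r = '_' :: t)
    (pat : List Char) (hlen : pat.length = 4) (hpat : '_' ∉ pat) :
    ((p ++ r).take 4 = pat ∧
      (match (p ++ r).drop 4 with | d :: _ => d != '_' | [] => false) = true)
      ↔ (pat <+: p ∧ 4 < p.length) := by
  constructor
  · rintro ⟨htake, hok⟩
    have hle : 4 ≤ p.length := by
      by_contra hlt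
      rw [not_le] at hlt
      rw [List.take_append] at htake
      rw [List.take_of_length_le (le_of_lt hlt)] at htake
      rcases hr with rfl | ⟨t, rfl⟩
      · simp at htake
        have := congrArg List.length htake
        simp [hlen] at this
        omega
      · have h1 : 0 < 4 - p.length := by omega
        have : '_' ∈ p ++ ('_' :: t).take (4 - p.length) := by
          obtain ⟨k, hk⟩ : ∃ k, 4 - p.length = k + 1 := ⟨4 - p.length - 1, by omega⟩
          rw [hk]
          simp
        rw [htake] at this
        exact hpat this
    have htake' : p.take 4 = pat := by
      rw [List.take_append_of_le_length hle] at htake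
      exact htake
    have hpre : pat <+: p := htake' ▸ List.take_prefix 4 p
    refine ⟨hpre, ?_⟩
    rcases Nat.lt_or_ge 4 p.length with h | h
    · exact h
    · -- p.length = 4
      have h4 : p.length = 4 := le_antisymm h hle
      rw [List.drop_append_of_le_length (by omega)] at hok
      rw [List.drop_of_length_le (by omega)] at hok
      rcases hr with rfl | ⟨t, rfl⟩
      · simp at hok
      · simp at hok
  · rintro ⟨hpre, hlt⟩
    have htake : (p ++ r).take 4 = pat := by
      rw [List.take_append_of_le_length (by omega)]
      have := List.prefix_iff_eq_take.mp hpre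
      rw [this, hlen]
    refine ⟨htake, ?_⟩
    rw [List.drop_append_of_le_length (by omega)]
    obtain ⟨d, t, hdt⟩ := List.exists_cons_of_ne_nil (l := p.drop 4)
      (by intro h; have := congrArg List.length h; simp at this; omega)
    rw [hdt]
    have hd : d ∈ p := (List.drop_subset 4 p) (hdt ▸ List.mem_cons_self ..)
    show (d != '_') = true
    simp only [bne_iff_ne, ne_eq]
    exact fun h => hp (h ▸ hd)
theorem pvTag_spec (p r : List Char) (hp : '_' ∉ p) (hr : r = [] ∨ ∃ t, r = '_' :: t) :
    pvTag (p ++ r) =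
      if ['s','u','b','-'] <+: p ∧ 4 < p.length then some true
      else if ['s','e','s','-'] <+: p ∧ 4 < p.length then some false
      else none := by
  have hsub := pvHit_iff p r hp hr ['s','u','b','-'] (by decide) (by decide)
  have hses := pvHit_iff p r hp hr ['s','e','s','-'] (by decide) (by decide)
  simp only [pvTag, hsub, hses]

theorem pvSubHit_iff (p : List Char) :
    pvSubHit (String.ofList p) = true ↔ (['s','u','b','-'] <+: p ∧ 4 < p.length) := by
  rw [pvSubHit, Bool.and_eq_true, PySem.Str.startswith_eq, String.toList_ofList,
    show ("sub-" : String).toList = ['s','u','b','-'] from by decide,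
    PySem.Chars.startswith_iff, PySem.Str.len_eq, String.toList_ofList]
  constructor
  · rintro ⟨h1, h2⟩; exact ⟨h1, by simpa using of_decide_eq_true h2⟩
  · rintro ⟨h1, h2⟩; exact ⟨h1, decide_eq_true (by exact_mod_cast h2)⟩

theorem pvSesHit_iff (p : List Char) :
    pvSesHit (String.ofList p) = true ↔ (['s','e','s','-'] <+: p ∧ 4 < p.length) := by
  rw [pvSesHit, Bool.and_eq_true, PySem.Str.startswith_eq, String.toList_ofList,
    show ("ses-" : String).toList = ['s','e','s','-'] from by decide,
    PySem.Chars.startswith_iff, PySem.Str.len_eq, String.toList_ofList]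
  constructor
  · rintro ⟨h1, h2⟩; exact ⟨h1, by simpa using of_decide_eq_true h2⟩
  · rintro ⟨h1, h2⟩; exact ⟨h1, decide_eq_true (by exact_mod_cast h2)⟩

theorem pvTail4_ofList (p : List Char) : pvTail4 (String.ofList p) = String.ofList (p.drop 4) := by
  apply String.toList_inj.mp
  rw [pvTail4, PySem.Str.toList_slice, String.toList_ofList, String.toList_ofList,
    PySem.Chars.slice_eq_listSlice, PySem.List.slice_from p (by norm_num)]
  rfl

theorem pvScan_part (p r : List Char) (hp : '_' ∉ p) (hr : r = [] ∨ ∃ t, r = '_' :: t)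
    (subj : String) (sess : Option String) :
    pvScan (p ++ r) true subj sess =
      pvScan r false (pvStep (subj, sess) (String.ofList p)).1 (pvStep (subj, sess) (String.ofList p)).2 := by
  have htag := pvTag_spec p r hp hr
  by_cases hsub : ['s','u','b','-'] <+: p ∧ 4 < p.length
  · rw [if_pos hsub] at htag
    obtain ⟨⟨t, rfl⟩, hlen⟩ := hsub
    have ht : '_' ∉ t := fun h => hp (by simp [h])
    have hstep : pvStep (subj, sess) (String.ofList (['s','u','b','-'] ++ t)) =
        (String.ofList t, sess) := by
      rw [pvStep, if_pos ((pvSubHit_iff _).mpr ⟨⟨t, rfl⟩, by simpa using hlen⟩), pvTail4_ofList]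
      simp
    rw [hstep]
    simp only [List.cons_append, List.nil_append] at htag ⊢
    rw [pvScan]
    simp [htag, pvSpanVal_eq t r ht hr]
  · rw [if_neg hsub] at htag
    by_cases hses : ['s','e','s','-'] <+: p ∧ 4 < p.length
    · rw [if_pos hses] at htag
      obtain ⟨⟨t, rfl⟩, hlen⟩ := hses
      have ht : '_' ∉ t := fun h => hp (by simp [h])
      have hsubF : pvSubHit (String.ofList (['s','e','s','-'] ++ t)) = false := by
        cases h : pvSubHit (String.ofList (['s','e','s','-'] ++ t))
        · rfl
        · exact absurd ((pvSubHit_iff _).mp h).1 (by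
            rintro ⟨u, hu⟩
            have := congrArg (fun l => l[1]?) hu
            simp at this)
      have hstep : pvStep (subj, sess) (String.ofList (['s','e','s','-'] ++ t)) =
          (subj, some (String.ofList t)) := by
        rw [pvStep, hsubF, if_neg (by simp),
          if_pos ((pvSesHit_iff _).mpr ⟨⟨t, rfl⟩, by simpa using hlen⟩), pvTail4_ofList]
        simp
      rw [hstep]
      simp only [List.cons_append, List.nil_append] at htag ⊢
      rw [pvScan]
      simp [htag, pvSpanVal_eq t r ht hr]
    · rw [if_neg hses] at htag
      have hstep : pvStep (subj, sess) (String.ofList p) = (subj, sess) := by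
        rw [pvStep]
        rw [show pvSubHit (String.ofList p) = false from by
          cases h : pvSubHit (String.ofList p)
          · rfl
          · exact absurd ((pvSubHit_iff _).mp h) hsub]
        rw [show pvSesHit (String.ofList p) = false from by
          cases h : pvSesHit (String.ofList p)
          · rfl
          · exact absurd ((pvSesHit_iff _).mp h) hses]
        simp
      rw [hstep]
      cases p with
      | nil =>
        rcases hr with rfl | ⟨t, rfl⟩
        · simp [pvScan]
        · simp only [List.nil_append] at htag ⊢
          rw [pvScan, pvScan]
          simp [htag]
      | cons c q =>
        have hc : c ≠ '_' := fun h => hp (h ▸ List.mem_cons_self ..)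
        have hq : '_' ∉ q := fun h => hp (List.mem_cons_of_mem _ h)
        simp only [List.cons_append] at htag ⊢
        rw [pvScan]
        simp only [htag]
        rw [show (c == '_') = false from by simp [hc]]
        exact pvScan_false q r hq subj sess

theorem pvScan_eq_foldl_aux :
    ∀ (n : Nat) (l : List Char), l.length ≤ n → ∀ (subj : String) (sess : Option String),
      pvScan l true subj sess =
        (pvRefSplit l).foldl (fun st p => pvStep st (String.ofList p)) (subj, sess) := by
  intro n
  induction n with
  | zero =>
    intro l hl subj sess
    rw [List.length_eq_zero_iff.mp (Nat.le_zero.mp hl)]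
    have h1 : pvSubHit (String.ofList []) = false := by decide
    have h2 : pvSesHit (String.ofList []) = false := by decide
    simp [pvScan, pvRefSplit, pvStep, h1, h2]
  | succ n ih =>
    intro l hl subj sess
    have hdec : l = l.takeWhile (fun c => c != '_') ++ l.dropWhile (fun c => c != '_') :=
      (List.takeWhile_append_dropWhile ..).symm
    have hp : '_' ∉ l.takeWhile (fun c => c != '_') := by
      intro h
      have := List.mem_takeWhile_imp h
      simp at this
    obtain ⟨q, hq⟩ : ∃ q, l.takeWhile (fun c => c != '_') = q := ⟨_, rfl⟩
    rw [hq] at hdec hp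
    cases hr : l.dropWhile (fun c => c != '_') with
    | nil =>
      rw [hr, List.append_nil] at hdec
      rw [hdec, pvRefSplit_no_sep _ hp, List.foldl_cons, List.foldl_nil]
      have h := pvScan_part q [] hp (Or.inl rfl) subj sess
      rw [List.append_nil, pvScan] at h
      exact h
    | cons c t =>
      have hc : c = '_' := by
        have := List.head_dropWhile_not (p := fun c => c != '_') (l := l) (by simp [hr])
        simp only [hr, List.head_cons] at this
        simpa using this
      subst hc
      rw [hr] at hdec
      have hl' : l = q ++ '_' :: t := hdec
      rw [hl']
      rw [pvScan_part _ ('_' :: t) hp (Or.inr ⟨t, rfl⟩) subj sess]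
      rw [pvScan]
      simp only [if_false, Bool.false_eq_true]
      rw [show ('_' == '_') = true from rfl]
      have hlen : t.length ≤ n := by
        have := congrArg List.length hl'
        simp at this
        omega
      rw [ih t hlen]
      rw [pvRefSplit_append q t hp, List.foldl_cons]

theorem pvScan_eq_foldl (l : List Char) (subj : String) (sess : Option String) :
    pvScan l true subj sess =
      (pvRefSplit l).foldl (fun st p => pvStep st (String.ofList p)) (subj, sess) :=
  pvScan_eq_foldl_aux l.length l le_rfl subj sess

-- ===== VERDICT (by name: the statement is the Claim_ definition above) =====
theorem parse_subject_session_from_entity_label_py_spec : Claim_equal_parse_subject_session_from_entity_label_py := by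
  intro entity_label _
  unfold Spec_parse_subject_session_from_entity_label_py
  unfold parse_subject_session_from_entity_label_py parse_subject_session_from_entity_label_py_alt
  rw [pvScan_eq_foldl]
  simp only [PySem.Str.split?, PySem.Chars.split?]
  simp [pvSplitOn_eq, List.foldl_map]
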